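-- pv_equiv track=rewrite | github.com/nicollorens12/LP | HinNer/hmVisitor.py | find_last_arrow_outside_parentheses
-- ===== SOURCE A (Python) =====
-- def find_last_arrow_outside_parentheses(type_string):
--     parenthesis_count = 0
--     for i in range(len(type_string) - 1, -1, -1):
--         if type_string[i] == ')':
--             parenthesis_count += 1
--         elif type_string[i] == '(':
--             parenthesis_count -= 1
--         elif type_string[i:i + 2] == '->' and parenthesis_count == 0:
--             return i
--     return -1
-- ===== SOURCE B (Python) =====
-- def find_last_arrow_outside_parentheses(type_string):
--     # Phase 1: one forward pass computing the total parenthesis balance.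
--     total = sum(1 if c == ')' else -1 if c == '(' else 0 for c in type_string)
--     # Phase 2: forward scan keeping the running balance of the prefix; an arrow at i
--     # is outside parentheses iff the balance of the suffix after it is zero, i.e.
--     # run == total there. Remember the last such position.
--     run = 0
--     best = -1
--     for i, c in enumerate(type_string):
--         if c == ')':
--             run += 1
--         elif c == '(':
--             run -= 1
--         elif run == total and type_string[i:i + 2] == '->':
--             best = i
--     return best
-- ===== Notes on version B (the rewrite author's own statement) =====
-- stated objective: alternative
-- what changed: Replaces the single backward scan carrying a right-side parenthesis counter with a two-phase forward algorithm: one pass computes the total parenthesis balance, then a forward pass with a running prefix balance records the last arrow position where the suffix balance (total minus prefix) is zero.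
import Mathlib
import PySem

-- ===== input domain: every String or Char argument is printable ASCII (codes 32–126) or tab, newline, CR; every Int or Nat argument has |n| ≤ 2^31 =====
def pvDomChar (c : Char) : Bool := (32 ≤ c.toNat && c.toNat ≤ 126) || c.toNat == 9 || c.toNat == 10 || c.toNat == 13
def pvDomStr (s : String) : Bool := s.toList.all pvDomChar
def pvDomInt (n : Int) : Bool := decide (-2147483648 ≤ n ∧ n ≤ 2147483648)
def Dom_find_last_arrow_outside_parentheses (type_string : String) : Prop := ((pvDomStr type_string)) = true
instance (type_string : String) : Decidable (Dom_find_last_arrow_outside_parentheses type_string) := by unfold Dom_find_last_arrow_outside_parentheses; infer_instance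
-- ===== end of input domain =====

-- B replaces A's single backward scan (right-side parenthesis counter) by a two-phase
-- forward algorithm: total balance first, then a forward scan with a running prefix
-- balance recording the last qualifying arrow; same O(n) cost, return value proved equal.

-- ===== PORT A =====
-- backward loop with early return: for i in range(len(s)-1, -1, -1)
def pvGoA (s : List Char) : List Int → Int → Int
  | [], _ => -1
  | i :: rest, cnt =>
    if PySem.List.pyGet? s i = some ')' then pvGoA s rest (cnt + 1)
    else if PySem.List.pyGet? s i = some '(' then pvGoA s rest (cnt - 1)
    else if PySem.List.slice s (some i) (some (i + 2)) = ['-', '>'] ∧ cnt = 0 then i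
    else pvGoA s rest cnt

def find_last_arrow_outside_parentheses (type_string : String) : Int :=
  pvGoA type_string.toList
    (PySem.List.pyRange ((type_string.toList.length : Int) - 1) (-1) (-1)) 0

-- ===== PORT B =====
def find_last_arrow_outside_parentheses_alt (type_string : String) : Int :=
  let s := type_string.toList
  -- phase 1: total parenthesis balance
  let total : Int :=
    s.foldl (fun t c => t + (if c = ')' then 1 else if c = '(' then (-1 : Int) else 0)) 0
  -- phase 2: forward scan with running prefix balance, remembering the last arrow
  let st :=
    (PySem.List.enumerate s 0).foldl
      (fun (st : Int × Int) ic =>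
        if ic.2 = ')' then (st.1 + 1, st.2)
        else if ic.2 = '(' then (st.1 - 1, st.2)
        else if st.1 = total ∧ PySem.List.slice s (some ic.1) (some (ic.1 + 2)) = ['-', '>'] then
          (st.1, ic.1)
        else st)
      (0, -1)
  st.2

-- ===== PRECONDITION & SPEC =====
def Spec_find_last_arrow_outside_parentheses (type_string : String) (out : Int) : Prop := out = find_last_arrow_outside_parentheses_alt type_string
instance (type_string : String) (out : Int) : Decidable (Spec_find_last_arrow_outside_parentheses type_string out) := by unfold Spec_find_last_arrow_outside_parentheses; infer_instance

-- ===== CLAIM (what is proved, stated in full; the proofs are below) =====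
def Claim_equal_find_last_arrow_outside_parentheses : Prop := ∀ (type_string : String), Dom_find_last_arrow_outside_parentheses type_string → Spec_find_last_arrow_outside_parentheses type_string (find_last_arrow_outside_parentheses type_string)

-- ===== LEMMAS AND PROOFS =====

-- parenthesis balance of a character list: #')' − #'('
def pvBal (l : List Char) : Int := (l.count ')' : Int) - (l.count '(' : Int)

-- the common predicate: position k holds no parenthesis, an arrow starts at k,
-- and the suffix strictly after k is balanced
def pvPb (s : List Char) (k : Nat) : Bool :=
  decide (¬ s.getD k ' ' = ')' ∧ ¬ s.getD k ' ' = '(' ∧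
    (s.drop k).take 2 = ['-', '>'] ∧ pvBal (s.drop (k + 1)) = 0)

-- the common reference value: last index below k satisfying pvPb, else -1
def pvBest (s : List Char) : Nat → Int
  | 0 => -1
  | k + 1 => if pvPb s k then (k : Int) else pvBest s k

theorem pvBal_cons (c : Char) (l : List Char) :
    pvBal (c :: l) = (if c = ')' then 1 else if c = '(' then (-1 : Int) else 0) + pvBal l := by
  simp only [pvBal, List.count_cons]
  split_ifs with h1 h2 <;> simp_all <;> omega

theorem pvBal_append (l₁ l₂ : List Char) : pvBal (l₁ ++ l₂) = pvBal l₁ + pvBal l₂ := by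
  simp only [pvBal, List.count_append]; push_cast; ring

theorem pvTotal_eq (s : List Char) (t : Int) :
    s.foldl (fun t c => t + (if c = ')' then 1 else if c = '(' then (-1 : Int) else 0)) t
      = t + pvBal s := by
  induction s generalizing t with
  | nil => simp [pvBal]
  | cons c l ih => simp only [List.foldl_cons, ih, pvBal_cons]; ring

theorem pvBal_drop (s : List Char) (k : Nat) (hk : k < s.length) :
    pvBal (s.drop k)
      = (if s[k] = ')' then 1 else if s[k] = '(' then (-1 : Int) else 0)
        + pvBal (s.drop (k + 1)) := by
  rw [List.drop_eq_getElem_cons hk, pvBal_cons]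

theorem pvBal_take (s : List Char) (k : Nat) (hk : k < s.length) :
    pvBal (s.take (k + 1))
      = pvBal (s.take k)
        + (if s[k] = ')' then 1 else if s[k] = '(' then (-1 : Int) else 0) := by
  have h0 : pvBal [] = 0 := by simp [pvBal]
  rw [List.take_add_one, List.getElem?_eq_getElem hk, Option.toList_some, pvBal_append,
      pvBal_cons, h0]
  ring

-- the arrow-outside-parens condition seen from the left equals it seen from the right
theorem pvCond_iff (s : List Char) (k : Nat) (hk : k < s.length)
    (h1 : ¬ s[k] = ')') (h2 : ¬ s[k] = '(') :
    (pvBal (s.take k) = pvBal s ↔ pvBal (s.drop (k + 1)) = 0) := by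
  have hsplit : pvBal s = pvBal (s.take k) + pvBal (s.drop k) := by
    conv_lhs => rw [← List.take_append_drop k s]
    exact pvBal_append _ _
  have hdk : pvBal (s.drop k) = pvBal (s.drop (k + 1)) := by
    rw [pvBal_drop s k hk, if_neg h1, if_neg h2]; ring
  omega

-- A's backward loop invariant
theorem pvGoA_inv (s : List Char) (k : Nat) (hk : k ≤ s.length) :
    pvGoA s (PySem.List.pyRange ((k : Int) - 1) (-1) (-1)) (pvBal (s.drop k)) = pvBest s k := by
  induction k with
  | zero =>
    rw [PySem.List.pyRange_neg_one_eq_nil (by omega)]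
    simp [pvGoA, pvBest]
  | succ k ih =>
    have hk' : k < s.length := by omega
    rw [show ((k + 1 : Nat) : Int) - 1 = (k : Int) by push_cast; ring,
        PySem.List.pyRange_neg_one_cons (by omega)]
    have hget : PySem.List.pyGet? s (k : Int) = some s[k] := by
      rw [PySem.List.pyGet?_natCast]; simp [hk']
    have hgetD : s.getD k ' ' = s[k] := List.getD_eq_getElem s ' ' hk'
    have hkopt : s[k]? = some s[k] := List.getElem?_eq_getElem hk'
    have hslice : PySem.List.slice s (some (k : Int)) (some ((k : Int) + 2))
        = (s.drop k).take 2 := by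
      have := PySem.List.slice_natCast_add (xs := s) (j := k) (n := 2)
      simpa using this
    simp only [pvGoA, hget, Option.some.injEq, pvBest]
    by_cases h1 : s[k] = ')'
    · rw [if_pos h1]
      have hPb : pvPb s k = false := by
        simp only [pvPb, hgetD, decide_eq_false_iff_not]
        rintro ⟨hc, -, -, -⟩; exact hc h1
      rw [hPb, if_neg (by simp),
          show pvBal (s.drop (k + 1)) + 1 = pvBal (s.drop k) by
            rw [pvBal_drop s k hk', if_pos h1]; ring]
      exact ih (by omega)
    · by_cases h2 : s[k] = '('
      · rw [if_neg h1, if_pos h2]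
        have hPb : pvPb s k = false := by
          simp only [pvPb, hgetD, decide_eq_false_iff_not]
          rintro ⟨-, hc, -, -⟩; exact hc h2
        rw [hPb, if_neg (by simp),
            show pvBal (s.drop (k + 1)) - 1 = pvBal (s.drop k) by
              rw [pvBal_drop s k hk', if_neg h1, if_pos h2]; ring]
        exact ih (by omega)
      · rw [if_neg h1, if_neg h2, hslice]
        by_cases h3 : (s.drop k).take 2 = ['-', '>'] ∧ pvBal (s.drop (k + 1)) = 0
        · have hPb : pvPb s k = true := by
            simp only [pvPb, hgetD, decide_eq_true_eq]
            exact ⟨h1, h2, h3.1, h3.2⟩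
          rw [if_pos h3, hPb, if_pos rfl]
        · have hPb : pvPb s k = false := by
            simp only [pvPb, hgetD, decide_eq_false_iff_not]
            rintro ⟨-, -, ha, hb⟩; exact h3 ⟨ha, hb⟩
          rw [if_neg h3, hPb, if_neg (by simp),
              show pvBal (s.drop (k + 1)) = pvBal (s.drop k) by
                rw [pvBal_drop s k hk', if_neg h1, if_neg h2]; ring]
          exact ih (by omega)

-- enumerate over a string is the indexed map over List.range
theorem pvEnum (s : List Char) :
    PySem.List.enumerate s 0
      = (List.range s.length).map (fun (j : Nat) => ((j : Int), s.getD j ' ')) := by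
  rw [PySem.List.enumerate_eq_map_pyRange (d := ' ')]
  simp only [PySem.List.len_eq, PySem.List.pyRange_zero_nat, List.map_map]
  refine List.map_congr_left fun j hj => ?_
  simp [PySem.List.pyGetD_natCast]

-- B's forward loop invariant
theorem pvGoB_inv (s : List Char) (total : Int) (htot : total = pvBal s)
    (k : Nat) (hk : k ≤ s.length) :
    ((List.range k).map (fun (j : Nat) => ((j : Int), s.getD j ' '))).foldl
      (fun (st : Int × Int) ic =>
        if ic.2 = ')' then (st.1 + 1, st.2)
        else if ic.2 = '(' then (st.1 - 1, st.2)
        else if st.1 = total ∧ PySem.List.slice s (some ic.1) (some (ic.1 + 2)) = ['-', '>'] then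
          (st.1, ic.1)
        else st)
      (0, -1)
      = (pvBal (s.take k), pvBest s k) := by
  induction k with
  | zero => simp [pvBal, pvBest]
  | succ k ih =>
    have hk' : k < s.length := by omega
    have hgetD : s.getD k ' ' = s[k] := List.getD_eq_getElem s ' ' hk'
    have hkopt : s[k]? = some s[k] := List.getElem?_eq_getElem hk'
    have hslice : PySem.List.slice s (some (k : Int)) (some ((k : Int) + 2))
        = (s.drop k).take 2 := by
      have := PySem.List.slice_natCast_add (xs := s) (j := k) (n := 2)
      simpa using this
    rw [List.range_succ, List.map_append, List.foldl_append, ih (by omega)]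
    simp only [List.map_cons, List.map_nil, List.foldl_cons, List.foldl_nil, hgetD, hslice,
      pvBest]
    by_cases h1 : s[k] = ')'
    · rw [if_pos h1]
      have hPb : pvPb s k = false := by
        simp only [pvPb, hgetD, decide_eq_false_iff_not]
        rintro ⟨hc, -, -, -⟩; exact hc h1
      rw [hPb, if_neg (by simp), pvBal_take s k hk', if_pos h1]
    · by_cases h2 : s[k] = '('
      · rw [if_neg h1, if_pos h2]
        have hPb : pvPb s k = false := by
          simp only [pvPb, hgetD, decide_eq_false_iff_not]
          rintro ⟨-, hc, -, -⟩; exact hc h2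
        rw [hPb, if_neg (by simp), pvBal_take s k hk', if_neg h1, if_pos h2]
        norm_num [sub_eq_add_neg]
      · rw [if_neg h1, if_neg h2]
        have hbal1 : pvBal (s.take (k + 1)) = pvBal (s.take k) := by
          rw [pvBal_take s k hk', if_neg h1, if_neg h2]; ring
        by_cases h3 : pvBal (s.take k) = total ∧ (s.drop k).take 2 = ['-', '>']
        · have hc : pvBal (s.drop (k + 1)) = 0 :=
            (pvCond_iff s k hk' h1 h2).mp (htot ▸ h3.1)
          have hPb : pvPb s k = true := by
            simp only [pvPb, hgetD, decide_eq_true_eq]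
            exact ⟨h1, h2, h3.2, hc⟩
          rw [if_pos h3, hPb, if_pos rfl, hbal1]
        · have hPb : pvPb s k = false := by
            simp only [pvPb, hgetD, decide_eq_false_iff_not]
            rintro ⟨-, -, ha, hb⟩
            exact h3 ⟨htot ▸ (pvCond_iff s k hk' h1 h2).mpr hb, ha⟩
          rw [if_neg h3, hbal1, hPb, if_neg (by simp)]

-- ===== VERDICT (by name: the statement is the Claim_ definition above) =====
theorem find_last_arrow_outside_parentheses_spec : Claim_equal_find_last_arrow_outside_parentheses := by
  intro ts _
  unfold Spec_find_last_arrow_outside_parentheses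
  show find_last_arrow_outside_parentheses ts = find_last_arrow_outside_parentheses_alt ts
  unfold find_last_arrow_outside_parentheses find_last_arrow_outside_parentheses_alt
  set s := ts.toList with hs
  have hA : pvGoA s (PySem.List.pyRange ((s.length : Int) - 1) (-1) (-1)) 0
      = pvBest s s.length := by
    have := pvGoA_inv s s.length le_rfl
    simpa [pvBal] using this
  rw [hA]
  have htot : s.foldl
      (fun t c => t + (if c = ')' then 1 else if c = '(' then (-1 : Int) else 0)) 0
      = pvBal s := by rw [pvTotal_eq]; ring
  simp only [htot, pvEnum s, pvGoB_inv s (pvBal s) rfl s.length le_rfl, List.take_length]
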